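-- pv_equiv track=rewrite | github.com/cupcakecaro/Gender_Ineuqality_in_Software_Development | src/legacy/preprocessing/clean_raw.py | _split_into_blocks
-- ===== SOURCE A (Python) =====
-- def _split_into_blocks(lines: list[str]) -> list[list[str]]:
--     """
--     Split a line list into blocks separated by blank lines.
--     Each block is a list of non-empty lines.
--     """
--     blocks: list[list[str]] = []
--     current: list[str] = []
--     for line in lines:
--         if line.strip():
--             current.append(line)
--         else:
--             if current:
--                 blocks.append(current)
--                 current = []
--     if current:
--         blocks.append(current)
--     return blocks
-- ===== SOURCE B (Python) =====
-- def _split_into_blocks(lines: list[str]) -> list[list[str]]: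
--     """Two staged passes: first find every blank-line index (the cut points),
--     then slice the blocks out between consecutive cut points, dropping empty slices."""
--     cuts = [-1] + [i for i, line in enumerate(lines) if not line.strip()] + [len(lines)]
--     return [block for a, b in zip(cuts, cuts[1:]) for block in [lines[a + 1:b]] if block]
-- ===== Notes on version B (the rewrite author's own statement) =====
-- stated objective: alternative
-- what changed: Replaced A's one-pass current/flush accumulator state machine with two staged passes: first collect the indices of all blank lines as cut points, then slice the blocks out between consecutive cut points and drop the empty slices.
import Mathlib
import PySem

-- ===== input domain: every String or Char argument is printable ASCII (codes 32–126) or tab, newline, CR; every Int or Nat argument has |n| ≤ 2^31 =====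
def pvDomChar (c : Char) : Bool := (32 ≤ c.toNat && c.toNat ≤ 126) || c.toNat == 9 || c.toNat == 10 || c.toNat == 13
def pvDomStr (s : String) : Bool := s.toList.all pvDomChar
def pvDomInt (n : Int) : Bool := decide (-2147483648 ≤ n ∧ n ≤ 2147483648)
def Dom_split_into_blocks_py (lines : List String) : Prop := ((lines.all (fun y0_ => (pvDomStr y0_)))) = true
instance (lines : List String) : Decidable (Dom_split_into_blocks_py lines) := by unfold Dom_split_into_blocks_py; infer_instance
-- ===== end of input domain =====

-- B replaces A's one-pass current/flush accumulator with two staged passes: collect the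
-- blank-line indices as cut points, then slice the blocks out between consecutive cut points
-- (alternative decomposition; same asymptotic cost).

-- ===== PORT A =====
-- one foldl step = one iteration of A's for-loop over (blocks, current)
def split_into_blocks_py (lines : List String) : List (List String) :=
  let st := lines.foldl
    (fun (s : List (List String) × List String) line =>
      if PySem.Str.strip line ≠ "" then (s.1, s.2 ++ [line])
      else if s.2 ≠ [] then (s.1 ++ [s.2], ([] : List String))
      else s)
    ([], [])
  if st.2 ≠ [] then st.1 ++ [st.2] else st.1

-- ===== PORT B =====
-- [i for i, line in enumerate(lines) if not line.strip()]
def pvBlankCuts (lines : List String) : List Int :=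
  (PySem.List.enumerate lines).filterMap
    (fun p => if PySem.Str.strip p.2 = "" then some p.1 else none)

-- cuts = [-1] + blank indices + [len(lines)]; then slice lines[a+1:b] for consecutive cut
-- pairs (zip(cuts, cuts[1:])) and keep the non-empty slices
def split_into_blocks_py_alt (lines : List String) : List (List String) :=
  let cuts : List Int := [-1] ++ pvBlankCuts lines ++ [(lines.length : Int)]
  (cuts.zip (PySem.List.slice cuts (some 1) none)).flatMap (fun p =>
    let block := PySem.List.slice lines (some (p.1 + 1)) (some p.2)
    if block ≠ [] then [block] else [])

-- ===== PRECONDITION & SPEC =====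
def Spec_split_into_blocks_py (lines : List String) (out : List (List String)) : Prop := out = split_into_blocks_py_alt lines
instance (lines : List String) (out : List (List String)) : Decidable (Spec_split_into_blocks_py lines out) := by unfold Spec_split_into_blocks_py; infer_instance

-- ===== CLAIM (what is proved, stated in full; the proofs are below) =====
def Claim_equal_split_into_blocks_py : Prop := ∀ (lines : List String), Dom_split_into_blocks_py lines → Spec_split_into_blocks_py lines (split_into_blocks_py lines)

-- ===== LEMMAS AND PROOFS =====

-- Python's bool(line.strip())
def pvNonblank (line : String) : Bool := PySem.Str.strip line != ""

-- common intermediate: blocks as maximal runs of non-blank lines (groupby-style recursion)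
def pvBlocks : List String → List (List String)
  | [] => []
  | l :: ls =>
    if pvNonblank l then
      (l :: ls.takeWhile (fun x => pvNonblank x == pvNonblank l)) ::
        pvBlocks (ls.dropWhile (fun x => pvNonblank x == pvNonblank l))
    else
      pvBlocks (ls.dropWhile (fun x => pvNonblank x == pvNonblank l))
termination_by ls => ls.length
decreasing_by
  all_goals exact Nat.lt_succ_of_le (List.dropWhile_sublist _ |>.length_le)

-- ---- A = pvBlocks ----

-- A's remaining computation from loop state `cur` over the unprocessed lines (including the final flush)
def pvFinishA (cur : List String) : List String → List (List String)
  | [] => if cur ≠ [] then [cur] else []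
  | l :: ls =>
    if PySem.Str.strip l ≠ "" then pvFinishA (cur ++ [l]) ls
    else if cur ≠ [] then cur :: pvFinishA [] ls else pvFinishA [] ls

lemma pvFoldA_eq_finish (lines : List String) :
    ∀ (blocks : List (List String)) (cur : List String),
      (let st := lines.foldl
        (fun (s : List (List String) × List String) line =>
          if PySem.Str.strip line ≠ "" then (s.1, s.2 ++ [line])
          else if s.2 ≠ [] then (s.1 ++ [s.2], ([] : List String))
          else s)
        (blocks, cur);
       if st.2 ≠ [] then st.1 ++ [st.2] else st.1) = blocks ++ pvFinishA cur lines := by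
  induction lines with
  | nil =>
    intro blocks cur
    simp only [List.foldl]
    rw [pvFinishA]
    by_cases hc : cur ≠ []
    · rw [if_pos hc, if_pos hc]
    · rw [if_neg hc, if_neg hc]
      simp
  | cons l ls ih =>
    intro blocks cur
    simp only [List.foldl]
    rw [pvFinishA]
    by_cases hl : PySem.Str.strip l ≠ ""
    · rw [if_pos hl, if_pos hl]
      exact ih blocks (cur ++ [l])
    · rw [if_neg hl, if_neg hl]
      by_cases hc : cur ≠ []
      · rw [if_pos hc, if_pos hc]
        rw [ih (blocks ++ [cur]) [], List.append_assoc]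
        simp
      · rw [if_neg hc, if_neg hc]
        rw [ih blocks cur]
        simp only [ne_eq, not_not] at hc
        rw [hc]

lemma pvBlocks_dropBlank (ls : List String) :
    pvBlocks (ls.dropWhile (fun x => pvNonblank x == false)) = pvBlocks ls := by
  cases ls with
  | nil => rfl
  | cons x xs =>
    by_cases hx : pvNonblank x
    · simp [List.dropWhile, hx]
    · rw [Bool.not_eq_true] at hx
      rw [List.dropWhile]
      simp only [hx, beq_self_eq_true]
      conv_rhs => rw [pvBlocks]
      simp [hx]

lemma pvBlocks_cons_blank (l : String) (ls : List String) (hl : pvNonblank l = false) :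
    pvBlocks (l :: ls) = pvBlocks ls := by
  rw [pvBlocks]
  simp only [hl, Bool.false_eq_true, if_false]
  exact pvBlocks_dropBlank ls

lemma pvFinish_eq_blocks (lines : List String) :
    ∀ (cur : List String),
      pvFinishA cur lines =
        if cur = [] then pvBlocks lines
        else (cur ++ lines.takeWhile (fun x => pvNonblank x == true)) ::
               pvBlocks (lines.dropWhile (fun x => pvNonblank x == true)) := by
  induction lines with
  | nil =>
    intro cur
    rw [pvFinishA]
    by_cases hc : cur = []
    · rw [if_pos hc, if_neg (by simp [hc])]
      simp [pvBlocks]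
    · rw [if_pos hc, if_neg hc]
      simp [pvBlocks]
  | cons l ls ih =>
    intro cur
    by_cases hl : PySem.Str.strip l ≠ ""
    · have hb : pvNonblank l = true := by simp [pvNonblank, hl]
      rw [pvFinishA, if_pos hl, ih (cur ++ [l])]
      rw [if_neg (by simp)]
      rw [List.takeWhile, List.dropWhile]
      simp only [hb, beq_self_eq_true]
      by_cases hc : cur = []
      · subst hc
        rw [if_pos rfl]
        conv_rhs => rw [pvBlocks]
        simp [hb]
      · rw [if_neg hc]
        simp
    · have hb : pvNonblank l = false := by
        simp only [ne_eq, not_not] at hl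
        simp [pvNonblank, hl]
      rw [pvFinishA, if_neg hl]
      by_cases hc : cur = []
      · subst hc
        rw [if_neg (by simp), if_pos rfl]
        rw [ih [], if_pos rfl, pvBlocks_cons_blank l ls hb]
      · rw [if_pos hc, if_neg hc]
        rw [ih [], if_pos rfl]
        rw [List.takeWhile, List.dropWhile]
        simp [hb, pvBlocks_cons_blank l ls hb]

lemma pvA_eq_blocks (lines : List String) : split_into_blocks_py lines = pvBlocks lines := by
  unfold split_into_blocks_py
  rw [pvFoldA_eq_finish lines [] [], pvFinish_eq_blocks lines [], if_pos rfl]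
  simp

-- ---- B = pvBlocks ----

-- blank-line indices as naturals
def pvBlanksN : List String → List Nat
  | [] => []
  | l :: ls =>
    if pvNonblank l then (pvBlanksN ls).map (· + 1)
    else 0 :: (pvBlanksN ls).map (· + 1)

lemma pvBlankCuts_from (ls : List String) :
    ∀ (s : Int),
      (PySem.List.enumerate ls s).filterMap
          (fun p => if PySem.Str.strip p.2 = "" then some p.1 else none) =
        (pvBlanksN ls).map (fun n : Nat => s + (n : Int)) := by
  induction ls with
  | nil => intro s; simp [PySem.List.enumerate_nil, pvBlanksN]
  | cons l ls ih =>
    intro s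
    rw [PySem.List.enumerate_cons, pvBlanksN]
    by_cases hl : pvNonblank l
    · have hs : ¬ PySem.Str.strip l = "" := by simpa [pvNonblank] using hl
      rw [if_pos hl, List.filterMap_cons_none (by simp [hs]), ih (s + 1), List.map_map]
      refine List.map_congr_left (fun n _ => ?_)
      simp
      ring
    · have hs : PySem.Str.strip l = "" := by simpa [pvNonblank] using hl
      rw [if_neg hl]
      simp only [List.filterMap_cons, hs, if_pos, ih (s + 1), List.map_map, List.map_cons]
      congr 1
      · simp
      · refine List.map_congr_left (fun n _ => ?_)
        simp
        ring

lemma pvBlankCuts_eq (lines : List String) :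
    pvBlankCuts lines = (pvBlanksN lines).map (fun n : Nat => (n : Int)) := by
  unfold pvBlankCuts
  rw [pvBlankCuts_from lines 0]
  simp

-- B's slicing pass over the cut points, in Nat form: `s` is the start of the next block
def pvChunks (lines : List String) : Nat → List Nat → List (List String)
  | _, [] => []
  | s, c :: cs =>
    (let blk := (lines.drop s).take (c - s); if blk ≠ [] then [blk] else []) ++
      pvChunks lines (c + 1) cs

lemma pvZip_eq_chunks (lines : List String) :
    ∀ (cs : List Nat) (a : Int) (s : Nat), a + 1 = (s : Int) →
      ((a :: cs.map (fun n : Nat => (n : Int))).zip (cs.map (fun n : Nat => (n : Int)))).flatMap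
          (fun p =>
            let block := PySem.List.slice lines (some (p.1 + 1)) (some p.2)
            if block ≠ [] then [block] else []) =
        pvChunks lines s cs := by
  intro cs
  induction cs with
  | nil => intro a s _; simp [pvChunks]
  | cons c cs ih =>
    intro a s hs
    rw [List.map_cons, List.zip_cons_cons, List.flatMap_cons, pvChunks]
    congr 1
    · simp only [hs, PySem.List.slice_natCast]
    · exact ih (c : Int) (c + 1) (by push_cast; ring)

lemma pvB_eq_chunks (lines : List String) :
    split_into_blocks_py_alt lines =
      pvChunks lines 0 (pvBlanksN lines ++ [lines.length]) := by
  have h1 : ([-1] ++ pvBlankCuts lines ++ [(lines.length : Int)]) =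
      (-1) :: (pvBlanksN lines ++ [lines.length]).map (fun n : Nat => (n : Int)) := by
    rw [pvBlankCuts_eq]; simp
  unfold split_into_blocks_py_alt
  simp only [h1, PySem.List.slice_from_one, List.tail_cons]
  exact pvZip_eq_chunks lines (pvBlanksN lines ++ [lines.length]) (-1) 0 (by ring)

-- dropping one leading line shifts every cut point and the start index by one
lemma pvChunks_shift (l : String) (ls : List String) :
    ∀ (cs : List Nat) (s : Nat),
      pvChunks (l :: ls) (s + 1) (cs.map (· + 1)) = pvChunks ls s cs := by
  intro cs
  induction cs with
  | nil => intro s; simp [pvChunks]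
  | cons c cs ih =>
    intro s
    rw [List.map_cons, pvChunks, pvChunks]
    congr 1
    · have : c + 1 - (s + 1) = c - s := by omega
      simp [List.drop_succ_cons, this]
    · exact ih (c + 1)

-- pvChunks over a shifted cut list, started at 0: the new head line joins the first block
lemma pvChunks_cons_nonblank (l : String) (ls : List String) (c : Nat) (cs : List Nat) :
    pvChunks (l :: ls) 0 ((c :: cs).map (· + 1)) =
      (l :: ls.take c) :: pvChunks ls (c + 1) cs := by
  rw [List.map_cons, pvChunks]
  have h1 : ((l :: ls).drop 0).take (c + 1 - 0) = l :: ls.take c := by simp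
  rw [h1]
  simp only [ne_eq, reduceCtorEq, not_false_eq_true, if_pos, List.singleton_append]
  congr 1
  exact pvChunks_shift l ls cs (c + 1)

-- B as a function of the line list
def pvBfun (lines : List String) : List (List String) :=
  pvChunks lines 0 (pvBlanksN lines ++ [lines.length])

lemma pvBfun_cons_blank (l : String) (ls : List String) (hl : pvNonblank l = false) :
    pvBfun (l :: ls) = pvBfun ls := by
  unfold pvBfun
  rw [show pvBlanksN (l :: ls) = 0 :: (pvBlanksN ls).map (· + 1) by
        rw [pvBlanksN]; simp [hl]]
  rw [List.cons_append, pvChunks]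
  simp only [List.drop_zero, Nat.zero_sub, List.take_zero, ne_eq, not_true_eq_false]
  rw [show (pvBlanksN ls).map (· + 1) ++ [(l :: ls).length] =
        ((pvBlanksN ls) ++ [ls.length]).map (· + 1) by simp]
  exact pvChunks_shift l ls _ 0

lemma pvBlocks_eq_bfun (lines : List String) : pvBlocks lines = pvBfun lines := by
  induction lines with
  | nil => simp [pvBlocks, pvBfun, pvBlanksN, pvChunks]
  | cons l ls ih =>
    by_cases hl : pvNonblank l
    · -- B-side: pvBlanksN (l :: ls) = map (+1) (pvBlanksN ls)
      have hB : pvBfun (l :: ls) =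
          pvChunks (l :: ls) 0 (((pvBlanksN ls) ++ [ls.length]).map (· + 1)) := by
        unfold pvBfun
        rw [show pvBlanksN (l :: ls) = (pvBlanksN ls).map (· + 1) by
              rw [pvBlanksN]; simp [hl]]
        congr 1
        simp
      cases ls with
      | nil =>
        rw [hB]
        simp [pvBlocks, pvBlanksN, pvChunks, hl]
      | cons l' ls' =>
        by_cases hl' : pvNonblank l'
        · -- both heads non-blank: l joins the first block of the tail's result
          have hc : pvBlanksN (l' :: ls') ++ [(l' :: ls').length] ≠ [] := by simp
          obtain ⟨c, cs, hcs⟩ := List.exists_cons_of_ne_nil hc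
          have h0' : pvBlanksN (l' :: ls') = (pvBlanksN ls').map (· + 1) := by
            rw [pvBlanksN]; simp [hl']
          have hc1 : 1 ≤ c := by
            rw [h0'] at hcs
            cases hX : pvBlanksN ls' with
            | nil => rw [hX] at hcs; simp at hcs; omega
            | cons b bs => rw [hX] at hcs; simp at hcs; omega
          have hne : (l' :: ls').take c ≠ [] := by
            cases c with
            | zero => omega
            | succ c' => simp
          have hBls : pvBfun (l' :: ls') =
              (l' :: ls').take c :: pvChunks (l' :: ls') (c + 1) cs := by
            unfold pvBfun
            rw [hcs, pvChunks]
            simp [hne]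
          rw [pvBlocks]
          simp only [hl, if_pos]
          rw [List.takeWhile_cons, List.dropWhile_cons]
          simp only [hl', beq_self_eq_true, if_pos]
          rw [pvBlocks] at ih
          simp only [hl', if_pos] at ih
          rw [hBls] at ih
          obtain ⟨h1, h2⟩ := List.cons.inj ih
          rw [hB, hcs, pvChunks_cons_nonblank, ← h1, ← h2]
        · -- head non-blank, next line blank: new singleton block [l], tail unchanged
          have hl'f : pvNonblank l' = false := by simpa using hl'
          rw [pvBlocks]
          simp only [hl, if_pos]
          rw [List.takeWhile_cons, List.dropWhile_cons]
          simp only [hl'f, show (false == true) = false from rfl, Bool.false_eq_true, if_false]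
          have h0 : pvBlanksN (l' :: ls') ++ [(l' :: ls').length] =
              0 :: ((pvBlanksN ls').map (· + 1) ++ [(l' :: ls').length]) := by
            rw [pvBlanksN]; simp [hl'f]
          rw [hB, h0, pvChunks_cons_nonblank, List.take_zero]
          rw [ih]
          unfold pvBfun
          rw [h0, pvChunks]
          simp
    · have hlf : pvNonblank l = false := by simpa using hl
      rw [pvBlocks_cons_blank l ls hlf, pvBfun_cons_blank l ls hlf, ih]

-- ===== VERDICT (by name: the statement is the Claim_ definition above) =====
theorem split_into_blocks_py_spec : Claim_equal_split_into_blocks_py := by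
  intro lines _
  unfold Spec_split_into_blocks_py
  rw [pvA_eq_blocks, pvB_eq_chunks, pvBlocks_eq_bfun, pvBfun]
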